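-- pv_equiv track=rewrite | github.com/neuroenglab/felt | src/visualization.py | _intersection_points
-- ===== SOURCE A (Python) =====
-- def _intersection_points(point_sets: dict[str, set], file_ids: tuple[str, ...] | None) -> set[tuple[int, int]]:
--     """Intersection of chosen points across the given file_ids. If file_ids is None, use all."""
--     if not point_sets:
--         return set()
--     ids = file_ids or list(point_sets.keys())
--     if not ids:
--         return set()
--     result = set(point_sets[ids[0]])
--     for fid in ids[1:]:
--         result &= point_sets[fid]
--     return result
-- ===== SOURCE B (Python) =====
-- def _intersection_points(point_sets: dict[str, set], file_ids: tuple[str, ...] | None) -> set[tuple[int, int]]: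
--     """Intersection of chosen points across the given file_ids. If file_ids is None, use all."""
--     if not point_sets:
--         return set()
--     ids = file_ids or list(point_sets.keys())
--     if not ids:
--         return set()
--     cnt = {}
--     for fid in ids:
--         for p in point_sets[fid]:
--             cnt[p] = cnt.get(p, 0) + 1
--     n = len(ids)
--     return {p for p, c in cnt.items() if c == n}
-- ===== Notes on version B (the rewrite author's own statement) =====
-- stated objective: alternative
-- what changed: Replaces the fold of pairwise set intersections (result &= next_set) by a counting pass: a dict counts, per point, in how many of the chosen sets it occurs, and the result keeps exactly the points whose count equals the number of ids (each id's set contributes at most one per point, so count == len(ids) iff the point lies in every chosen set).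
import Mathlib
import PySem

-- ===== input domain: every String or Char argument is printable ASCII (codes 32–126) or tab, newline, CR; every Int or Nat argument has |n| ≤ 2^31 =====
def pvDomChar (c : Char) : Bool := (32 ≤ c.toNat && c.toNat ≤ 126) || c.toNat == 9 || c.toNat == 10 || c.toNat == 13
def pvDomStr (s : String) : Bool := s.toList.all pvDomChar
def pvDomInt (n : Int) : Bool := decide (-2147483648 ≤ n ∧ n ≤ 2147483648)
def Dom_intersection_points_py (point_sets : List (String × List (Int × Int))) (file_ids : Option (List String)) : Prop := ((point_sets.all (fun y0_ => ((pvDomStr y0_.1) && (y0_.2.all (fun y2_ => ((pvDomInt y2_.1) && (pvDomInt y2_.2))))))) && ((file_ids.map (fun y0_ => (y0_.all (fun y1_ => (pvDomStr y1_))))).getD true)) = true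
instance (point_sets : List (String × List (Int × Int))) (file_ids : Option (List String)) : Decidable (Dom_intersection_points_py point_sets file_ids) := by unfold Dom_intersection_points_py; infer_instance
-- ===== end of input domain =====

-- B replaces the fold of pairwise intersections by a counting pass: a dict counts in how
-- many of the chosen sets each point occurs; points with count = len(ids) form the result.

-- ===== PORT A =====
-- ids = file_ids or list(point_sets.keys())  (empty tuple is falsy, like None)
def pvIds (point_sets : List (String × List (Int × Int))) (file_ids : Option (List String)) : List String :=
  match file_ids with
  | some l => if l = [] then PySem.Dict.keys (PySem.Dict.mk point_sets) else l
  | none => PySem.Dict.keys (PySem.Dict.mk point_sets)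

def intersection_points_py (point_sets : List (String × List (Int × Int))) (file_ids : Option (List String)) : List (Int × Int) :=
  if point_sets = [] then []
  else
    match pvIds point_sets file_ids with
    | [] => []
    | fid0 :: rest =>
      -- result = set(point_sets[ids[0]]); for fid in ids[1:]: result &= point_sets[fid]
      -- (Dict.getD with default [] is the total form of the lookup; Pre_ excludes the KeyError inputs)
      rest.foldl (fun r fid => PySem.Set.inter r (PySem.Dict.getD (PySem.Dict.mk point_sets) fid []))
        (PySem.Set.ofList (PySem.Dict.getD (PySem.Dict.mk point_sets) fid0 []))

-- ===== PORT B =====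
def intersection_points_py_alt (point_sets : List (String × List (Int × Int))) (file_ids : Option (List String)) : List (Int × Int) :=
  if point_sets = [] then []
  else
    let ids := pvIds point_sets file_ids
    if ids = [] then []
    else
      -- cnt[p] = cnt.get(p, 0) + 1, iterating each id's points; a dict value iterated as a
      -- Python set is its distinct elements, hence Set.ofList around the looked-up list
      let cnt : PySem.Dict (Int × Int) Int :=
        ids.foldl (fun d fid =>
            (PySem.Set.ofList (PySem.Dict.getD (PySem.Dict.mk point_sets) fid [])).foldl
              (fun d p => d.modify p 0 (· + 1)) d)
          PySem.Dict.empty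
      -- {p for p, c in cnt.items() if c == n}
      (cnt.items.filter (fun pc => pc.2 == (ids.length : Int))).map Prod.fst

-- ===== PRECONDITION & SPEC =====
-- Pre_ excludes exactly the inputs on which A raises KeyError: a nonempty point_sets with an
-- explicitly given file_id that is not a key of point_sets.
def Pre_intersection_points_py (point_sets : List (String × List (Int × Int))) (file_ids : Option (List String)) : Prop :=
  point_sets = [] ∨ ∀ fid ∈ file_ids.getD [], PySem.Dict.contains (PySem.Dict.mk point_sets) fid = true
instance (point_sets : List (String × List (Int × Int))) (file_ids : Option (List String)) : Decidable (Pre_intersection_points_py point_sets file_ids) := by unfold Pre_intersection_points_py; infer_instance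

def pvWitness_intersection_points_py : (List (String × List (Int × Int))) × Option (List String) :=
  ([("a", [(1, 2), (3, 4)]), ("b", [(3, 4)])], some ["a", "b"])

def Spec_intersection_points_py (point_sets : List (String × List (Int × Int))) (file_ids : Option (List String)) (out : List (Int × Int)) : Prop := out = intersection_points_py_alt point_sets file_ids
instance (point_sets : List (String × List (Int × Int))) (file_ids : Option (List String)) (out : List (Int × Int)) : Decidable (Spec_intersection_points_py point_sets file_ids out) := by unfold Spec_intersection_points_py; infer_instance

-- ===== CLAIM (what is proved, stated in full; the proofs are below) =====
def Claim_equal_intersection_points_py : Prop := ∀ (point_sets : List (String × List (Int × Int))) (file_ids : Option (List String)), Dom_intersection_points_py point_sets file_ids → Pre_intersection_points_py point_sets file_ids → Spec_intersection_points_py point_sets file_ids (intersection_points_py point_sets file_ids)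

-- ===== LEMMAS AND PROOFS =====
-- A side: folding pairwise intersections = one filter by membership in every set
theorem foldl_inter_eq_filter_all (others : List (List (Int × Int))) (init : List (Int × Int)) :
    others.foldl (fun r t => PySem.Set.inter r t) init
      = init.filter (fun p => others.all (fun s => PySem.Set.contains s p)) := by
  induction others generalizing init with
  | nil => simp
  | cons t rest ih =>
    rw [List.foldl_cons, ih]
    simp only [PySem.Set.inter, List.filter_filter, List.all_cons]
    refine List.filter_congr fun p _ => ?_
    rw [Bool.and_comm]

-- B side: the nested counting loop is Counter of the flattened set contents
theorem cnt_eq_counter (sets : List (List (Int × Int))) :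
    sets.foldl (fun d s => s.foldl (fun d p => PySem.Dict.modify d p 0 (· + 1)) d) PySem.Dict.empty
      = PySem.Dict.counter sets.flatten := by
  rw [PySem.Dict.counter_eq_foldl, List.foldl_flatten]

-- count of a point in the flattening of duplicate-free lists = how many lists contain it
theorem count_flatten_nodup (sets : List (List (Int × Int))) (h : ∀ s ∈ sets, s.Nodup) (p : Int × Int) :
    sets.flatten.count p = sets.countP (fun s => decide (p ∈ s)) := by
  induction sets with
  | nil => simp
  | cons s rest ih =>
    simp only [List.flatten_cons, List.count_append, List.countP_cons]
    rw [ih (fun t ht => h t (List.mem_cons_of_mem _ ht))]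
    by_cases hp : p ∈ s
    · rw [List.count_eq_one_of_mem (h s (List.mem_cons_self)) hp]; simp [hp, Nat.add_comm]
    · rw [List.count_eq_zero_of_not_mem hp]; simp [hp]

-- count = number of sets ↔ the point is in every set
theorem count_eq_iff_all (sets : List (List (Int × Int))) (h : ∀ s ∈ sets, s.Nodup) (p : Int × Int) :
    (sets.flatten.count p = sets.length) ↔ ∀ s ∈ sets, p ∈ s := by
  rw [count_flatten_nodup sets h p, List.countP_eq_length]
  constructor
  · intro hc s hs; simpa using hc s hs
  · intro hall s hs; simp [hall s hs]

-- membership test ignores deduplication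
theorem contains_ofList (s : List (Int × Int)) (p : Int × Int) :
    List.contains (PySem.Set.ofList s) p = List.contains s p := by
  rw [Bool.eq_iff_iff, List.contains_iff_mem, List.contains_iff_mem]
  exact PySem.Set.mem_ofList s p
  
-- keeping the points of count = number of sets, in first-occurrence order, is filtering the
-- first set by membership in all the others
theorem counting_filter_eq (s0 : List (Int × Int)) (sets : List (List (Int × Int)))
    (h0 : s0.Nodup) (h : ∀ s ∈ sets, s.Nodup) :
    (PySem.Set.ofList (s0 :: sets).flatten).filter
        (fun p => (((s0 :: sets).flatten.count p : Int) == ((s0 :: sets).length : Int)))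
      = s0.filter (fun p => sets.all (fun s => PySem.Set.contains s p)) := by
  have hnd : ∀ s ∈ s0 :: sets, s.Nodup := by
    intro s hs
    rcases List.mem_cons.mp hs with rfl | hs
    · exact h0
    · exact h s hs
  have hq : ∀ p, (((s0 :: sets).flatten.count p : Int) == ((s0 :: sets).length : Int)) = true →
      p ∈ s0 := by
    intro p hp
    have hc : (s0 :: sets).flatten.count p = (s0 :: sets).length := by
      have := beq_iff_eq.mp hp; omega
    exact (count_eq_iff_all _ hnd p).mp hc s0 List.mem_cons_self
  have hflat : (s0 :: sets).flatten = s0 ++ sets.flatten := List.flatten_cons ..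
  rw [show (PySem.Set.ofList (s0 :: sets).flatten) = PySem.Set.update s0 sets.flatten by
        rw [hflat, PySem.Set.ofList_append, PySem.Set.ofList_eq_self_of_nodup s0 h0],
      PySem.Set.update_eq_append_filter, List.filter_append, List.filter_filter]
  have h2 : ((PySem.Set.ofList sets.flatten).filter
      (fun y => (((s0 :: sets).flatten.count y : Int) == ((s0 :: sets).length : Int)) &&
        !(PySem.Set.contains s0 y))) = [] := by
    rw [List.filter_eq_nil_iff]
    intro y _ hcontra
    rw [Bool.and_eq_true] at hcontra
    obtain ⟨h1', h2'⟩ := hcontra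
    rw [Bool.not_eq_eq_eq_not, Bool.not_true] at h2'
    have hcy : PySem.Set.contains s0 y = true := (PySem.Set.contains_iff s0 y).mpr (hq y h1')
    rw [h2'] at hcy
    exact Bool.false_ne_true hcy
  rw [h2, List.append_nil]
  refine List.filter_congr fun p hp => ?_
  by_cases hall : ∀ s ∈ sets, p ∈ s
  · have hc := (count_eq_iff_all _ hnd p).mpr (by
      intro s hs
      rcases List.mem_cons.mp hs with rfl | hs
      · exact hp
      · exact hall s hs)
    rw [show ((((s0 :: sets).flatten.count p : Int)) == ((s0 :: sets).length : Int)) = true by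
      rw [beq_iff_eq]; exact_mod_cast hc]
    symm; rw [List.all_eq_true]
    intro s hs; exact (PySem.Set.contains_iff s p).mpr (hall s hs)
  · have h1 : ¬ (s0 :: sets).flatten.count p = (s0 :: sets).length := by
      intro hc
      exact hall fun s hs => (count_eq_iff_all _ hnd p).mp hc s (List.mem_cons_of_mem _ hs)
    rw [show ((((s0 :: sets).flatten.count p : Int)) == ((s0 :: sets).length : Int)) = false by
      rw [beq_eq_false_iff_ne]; intro hc; exact h1 (by omega)]
    symm; rw [List.all_eq_false]
    push Not at hall
    obtain ⟨s, hs, hps'⟩ := hall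
    exact ⟨s, hs, by simpa [PySem.Set.contains_iff] using hps'⟩

-- ===== VERDICT (by name: the statement is the Claim_ definition above) =====
theorem intersection_points_py_spec : Claim_equal_intersection_points_py := by
  intro ps fids _ _
  unfold Spec_intersection_points_py intersection_points_py intersection_points_py_alt
  by_cases hps : ps = []
  · simp [hps]
  rw [if_neg hps, if_neg hps]
  cases h : pvIds ps fids with
  | nil => simp
  | cons fid0 rest =>
    dsimp only
    rw [if_neg (by simp : ¬ (fid0 :: rest) = [])]
    set g : String → List (Int × Int) := fun fid => PySem.Dict.getD (PySem.Dict.mk ps) fid [] with hg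
    have hcnt : (fid0 :: rest).foldl (fun d fid =>
          (PySem.Set.ofList (g fid)).foldl (fun d p => PySem.Dict.modify d p 0 (· + 1)) d)
          PySem.Dict.empty
        = PySem.Dict.counter ((fid0 :: rest).map (fun fid => PySem.Set.ofList (g fid))).flatten := by
      rw [← cnt_eq_counter, List.foldl_map]
    rw [← List.foldl_map, foldl_inter_eq_filter_all, hcnt, PySem.Dict.items_counter,
        List.filter_map, List.map_map]
    simp only [Function.comp_def, List.map_id']
    rw [show ((fid0 :: rest).length : Int)
          = (((fid0 :: rest).map (fun fid => PySem.Set.ofList (g fid))).length : Int) by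
        rw [List.length_map]]
    rw [List.map_cons]
    rw [counting_filter_eq (PySem.Set.ofList (g fid0)) (rest.map (fun fid => PySem.Set.ofList (g fid)))
        (PySem.Set.nodup_ofList _) (by
          intro s hs
          obtain ⟨fid, _, rfl⟩ := List.mem_map.mp hs
          exact PySem.Set.nodup_ofList _)]
    refine List.filter_congr fun p hp => ?_
    rw [List.all_map, List.all_map]
    simp only [Function.comp_def, PySem.Set.contains_eq_listContains, contains_ofList, hg]
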